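-- pv_equiv track=rewrite | github.com/Ingeniums/ingecode-e1-challenges | Medium - Visible Sandwiches/solution.py | calculate_visible_sandwiches
-- ===== SOURCE A (Python) =====
-- import math
--
-- def calculate_visible_sandwiches(test_cases):
--     results = []
--
--     for x, y, sandwiches in test_cases:
--         visibility_map = {}
--
--         for sx, sy in sandwiches:
--             dx, dy = sx - x, sy - y
--             gcd = math.gcd(dx, dy)
--             direction = (dx // gcd, dy // gcd)
--
--             if direction not in visibility_map or gcd < visibility_map[direction][0]:
--                 visibility_map[direction] = (gcd, (sx, sy))
--
--         visible_sandwiches = [coord for _, coord in visibility_map.values()]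
--         visible_sandwiches.sort()  # Sort by x, then y
--         results.append(visible_sandwiches)
--
--     return results
-- ===== SOURCE B (Python) =====
-- import math
--
-- def calculate_visible_sandwiches(test_cases):
--     results = []
--     for x, y, sandwiches in test_cases:
--         items = []
--         for sx, sy in sandwiches:
--             dx, dy = sx - x, sy - y
--             g = math.gcd(dx, dy)
--             items.append((g, (dx // g, dy // g), (sx, sy)))
--         items.sort(key=lambda t: t[0])
--         seen = set()
--         chosen = []
--         for g, d, coord in items:
--             if d not in seen:
--                 seen.add(d)
--                 chosen.append(coord)
--         chosen.sort()
--         results.append(chosen)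
--     return results
-- ===== Notes on version B (the rewrite author's own statement) =====
-- stated objective: alternative
-- what changed: B computes (gcd, direction, coord) triples, stably sorts them by gcd, then makes one first-seen-direction pass with a set, keeping the coordinate the first time each direction appears, instead of A's running-min-per-direction dict update.
import Mathlib
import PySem

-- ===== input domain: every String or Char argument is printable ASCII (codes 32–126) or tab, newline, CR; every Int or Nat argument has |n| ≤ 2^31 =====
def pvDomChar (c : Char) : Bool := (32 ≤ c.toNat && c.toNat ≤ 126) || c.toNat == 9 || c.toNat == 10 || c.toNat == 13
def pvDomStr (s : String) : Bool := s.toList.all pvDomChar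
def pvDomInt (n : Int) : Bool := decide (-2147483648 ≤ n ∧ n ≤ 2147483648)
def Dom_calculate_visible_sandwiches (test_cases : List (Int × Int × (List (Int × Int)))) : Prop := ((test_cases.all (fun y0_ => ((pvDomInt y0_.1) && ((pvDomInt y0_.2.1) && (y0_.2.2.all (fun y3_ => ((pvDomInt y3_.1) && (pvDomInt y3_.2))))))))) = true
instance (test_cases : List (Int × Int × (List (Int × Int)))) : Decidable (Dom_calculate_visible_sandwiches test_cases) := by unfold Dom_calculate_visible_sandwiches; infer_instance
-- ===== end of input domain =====

-- B replaces A's running-min-per-direction dict by a stable sort of (gcd, direction, coord) triples on gcd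
-- followed by one first-seen-direction pass with a set (objective: alternative decomposition, same result).

-- ===== PORT A =====
-- shared arithmetic of both Pythons: math.gcd (non-negative) and the floor-divided direction
def pvG (x y : Int) (s : Int × Int) : Int := (Int.gcd (s.1 - x) (s.2 - y) : Int)
def pvDir (x y : Int) (s : Int × Int) : Int × Int :=
  (PySem.Int.floordiv (s.1 - x) (pvG x y s), PySem.Int.floordiv (s.2 - y) (pvG x y s))

-- body of A's inner loop: `if direction not in vm or gcd < vm[direction][0]: vm[direction] = (gcd, (sx, sy))`
def pvStepA (x y : Int) (d : PySem.Dict (Int × Int) (Int × (Int × Int))) (s : Int × Int) :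
    PySem.Dict (Int × Int) (Int × (Int × Int)) :=
  match d.get? (pvDir x y s) with
  | none => d.insert (pvDir x y s) (pvG x y s, s)
  | some m => if pvG x y s < m.1 then d.insert (pvDir x y s) (pvG x y s, s) else d

def calculate_visible_sandwiches (test_cases : List (Int × Int × (List (Int × Int)))) : List (List (Int × Int)) :=
  test_cases.map (fun tc =>
    let vm := tc.2.2.foldl (pvStepA tc.1 tc.2.1) PySem.Dict.empty
    -- `[coord for _, coord in vm.values()]` then `.sort()` (lexicographic on pairs)
    PySem.List.sorted2 (vm.values.map (fun v => v.2)) Prod.fst Prod.snd false)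

-- ===== PORT B =====
-- B's triple `(g, (dx // g, dy // g), (sx, sy))`
def pvItem (x y : Int) (s : Int × Int) : Int × (Int × Int) × (Int × Int) :=
  (pvG x y s, pvDir x y s, s)

-- body of B's dedup loop: `if d not in seen: seen.add(d); chosen.append(coord)`
def pvPickStep (acc : PySem.Set (Int × Int) × List (Int × Int))
    (t : Int × (Int × Int) × (Int × Int)) : PySem.Set (Int × Int) × List (Int × Int) :=
  if PySem.Set.contains acc.1 t.2.1 then acc else (PySem.Set.add acc.1 t.2.1, acc.2 ++ [t.2.2])

def calculate_visible_sandwiches_alt (test_cases : List (Int × Int × (List (Int × Int)))) : List (List (Int × Int)) :=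
  test_cases.map (fun tc =>
    let items := tc.2.2.map (pvItem tc.1 tc.2.1)
    -- `items.sort(key=lambda t: t[0])` — stable sort on the gcd
    let sortedItems := PySem.List.sorted items (fun t => t.1) false
    -- first-seen-direction pass with a set
    let chosen := (sortedItems.foldl pvPickStep (PySem.Set.empty, [])).2
    -- `chosen.sort()` (lexicographic on pairs)
    PySem.List.sorted2 chosen Prod.fst Prod.snd false)

-- ===== PRECONDITION & SPEC =====
-- Pre_ excludes test cases containing a sandwich at the observation point (x, y) itself: there
-- math.gcd(0,0) = 0 and both Pythons raise ZeroDivisionError.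
def Pre_calculate_visible_sandwiches (test_cases : List (Int × Int × (List (Int × Int)))) : Prop :=
  ∀ tc ∈ test_cases, ∀ s ∈ tc.2.2, ¬(s.1 = tc.1 ∧ s.2 = tc.2.1)
instance (test_cases : List (Int × Int × (List (Int × Int)))) : Decidable (Pre_calculate_visible_sandwiches test_cases) := by unfold Pre_calculate_visible_sandwiches; infer_instance
def pvWitness_calculate_visible_sandwiches : (List (Int × Int × (List (Int × Int)))) :=
  [(0, 0, [(1, 2), (2, 4), (1, 0), (-3, 0)])]
def Spec_calculate_visible_sandwiches (test_cases : List (Int × Int × (List (Int × Int)))) (out : List (List (Int × Int))) : Prop := out = calculate_visible_sandwiches_alt test_cases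
instance (test_cases : List (Int × Int × (List (Int × Int)))) (out : List (List (Int × Int))) : Decidable (Spec_calculate_visible_sandwiches test_cases out) := by unfold Spec_calculate_visible_sandwiches; infer_instance

-- ===== CLAIM (what is proved, stated in full; the proofs are below) =====
def Claim_equal_calculate_visible_sandwiches : Prop := ∀ (test_cases : List (Int × Int × (List (Int × Int)))), Dom_calculate_visible_sandwiches test_cases → Pre_calculate_visible_sandwiches test_cases → Spec_calculate_visible_sandwiches test_cases (calculate_visible_sandwiches test_cases)

-- ===== LEMMAS AND PROOFS =====

-- the running-min step of PySem.List.min?, with a general seed so it can be pushed through a fold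
def pvRunMin (o : Option (Int × (Int × Int))) (m : List (Int × (Int × Int))) : Option (Int × (Int × Int)) :=
  m.foldl (fun acc p =>
    match acc with
    | none => some p
    | some q => if p.1 < q.1 then some p else some q) o

-- A's per-key content: the fold's lookup at k is the running min of the elements aimed at k
theorem pvStepA_get (x y : Int) (l : List (Int × Int)) (d : PySem.Dict (Int × Int) (Int × (Int × Int))) (k : Int × Int) :
    (l.foldl (pvStepA x y) d).get? k
      = pvRunMin (d.get? k) ((l.filter (fun s => pvDir x y s == k)).map (fun s => (pvG x y s, s))) := by
  induction l generalizing d with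
  | nil => rfl
  | cons s t ih =>
    simp only [List.foldl_cons, List.filter_cons]
    by_cases h : pvDir x y s = k
    · simp only [h, beq_self_eq_true, if_true, List.map_cons]
      rw [ih]
      have : pvRunMin (d.get? k) ((pvG x y s, s) :: ((t.filter (fun s => pvDir x y s == k)).map (fun s => (pvG x y s, s))))
          = pvRunMin (match d.get? k with
              | none => some (pvG x y s, s)
              | some q => if pvG x y s < q.1 then some (pvG x y s, s) else some q)
            ((t.filter (fun s => pvDir x y s == k)).map (fun s => (pvG x y s, s))) := rfl
      rw [this]
      congr 1
      unfold pvStepA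
      rw [h]
      cases hd : d.get? k with
      | none => simp [PySem.Dict.get?_insert_self d k]
      | some m =>
        by_cases hg : pvG x y s < m.1
        · simp [hg, PySem.Dict.get?_insert_self d k]
        · simp [hg, hd]
    · have hb : (pvDir x y s == k) = false := by simp [h]
      simp only [hb]
      rw [if_neg (by simp)]
      rw [ih]
      congr 1
      unfold pvStepA
      cases hd : d.get? (pvDir x y s) with
      | none => exact PySem.Dict.get?_insert_of_ne d _ (fun hk => h hk.symm)
      | some m =>
        by_cases hg : pvG x y s < m.1
        · simp only [hg, if_true]
          exact PySem.Dict.get?_insert_of_ne d _ (fun hk => h hk.symm)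
        · simp [hg]

-- A's key list: first-occurrence order of the directions
theorem pvStepA_keys (x y : Int) (l : List (Int × Int)) (d : PySem.Dict (Int × Int) (Int × (Int × Int))) :
    (l.foldl (pvStepA x y) d).keys = PySem.Set.update d.keys (l.map (pvDir x y)) := by
  induction l generalizing d with
  | nil => rfl
  | cons s t ih =>
    simp only [List.foldl_cons, List.map_cons, PySem.Set.update_cons]
    rw [ih]
    congr 1
    unfold pvStepA
    cases hd : d.get? (pvDir x y s) with
    | none =>
      have hc : d.contains (pvDir x y s) = false := by
        rw [PySem.Dict.contains_eq_isSome_get?, hd]; rfl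
      rw [PySem.Dict.keys_insert_of_not_contains d _ hc]
      have hnm : pvDir x y s ∉ d.keys := by
        rw [PySem.Dict.contains_eq_decide_mem_keys] at hc
        simpa using hc
      rw [PySem.Set.add_of_not_mem hnm]
    | some m =>
      have hc : d.contains (pvDir x y s) = true := by
        rw [PySem.Dict.contains_eq_isSome_get?, hd]; rfl
      have hmem : pvDir x y s ∈ d.keys := by
        rw [PySem.Dict.contains_eq_decide_mem_keys] at hc
        simpa using hc
      by_cases hg : pvG x y s < m.1
      · simp only [hg, if_true]
        rw [PySem.Dict.keys_insert_of_contains d _ hc]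
        rw [PySem.Set.add_of_mem hmem]
      · simp [hg, PySem.Set.add_of_mem hmem]

-- head of the insertion-sort fold is the strict running minimum of the keys
theorem pvHead_foldl_insertBy {α κ : Type} [LinearOrder κ] (key : α → κ) (l : List α) (acc : List α) :
    (l.foldl (fun acc x => PySem.List.insertBy (fun a b => decide (key a < key b)) x acc) acc).head?
      = l.foldl (fun o x =>
          match o with
          | none => some x
          | some m => if key x < key m then some x else some m) acc.head? := by
  induction l generalizing acc with
  | nil => rfl
  | cons x t ih =>
    simp only [List.foldl_cons]
    rw [ih]
    congr 1
    cases acc with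
    | nil => rfl
    | cons h r =>
      simp only [PySem.List.insertBy]
      by_cases hlt : key x < key h
      · simp [hlt]
      · simp [hlt]

-- insertBy into a list everywhere strictly greater just prepends
theorem pvInsertBy_all (before : α → α → Bool) (x : α) (l : List α) (h : ∀ z ∈ l, before x z) :
    PySem.List.insertBy before x l = x :: l := by
  cases l with
  | nil => rfl
  | cons a r => simp [PySem.List.insertBy, h a (by simp)]

-- filter commutes with insertBy into a key-sorted list
theorem pvFilter_insertBy {α κ : Type} [LinearOrder κ] (key : α → κ) (p : α → Bool) (x : α) (ys : List α)
    (h : ys.Pairwise (fun a b => key a ≤ key b)) :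
    (PySem.List.insertBy (fun a b => decide (key a < key b)) x ys).filter p
      = if p x then PySem.List.insertBy (fun a b => decide (key a < key b)) x (ys.filter p)
        else ys.filter p := by
  induction ys with
  | nil =>
    simp only [PySem.List.insertBy, List.filter]
    cases hp : p x <;> simp
  | cons y r ih =>
    have hpw := List.pairwise_cons.mp h
    by_cases hlt : key x < key y
    · have hall : ∀ z ∈ (y :: r).filter p, decide (key x < key z) = true := by
        intro z hz
        have hzm : z ∈ y :: r := List.mem_of_mem_filter hz
        rcases List.mem_cons.mp hzm with hzy | hzr
        · subst hzy; simpa using hlt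
        · have := hpw.1 z hzr
          simp only [decide_eq_true_eq]
          exact lt_of_lt_of_le hlt this
      have hins : PySem.List.insertBy (fun a b => decide (key a < key b)) x (y :: r)
          = x :: y :: r := by
        simp [PySem.List.insertBy, hlt]
      rw [hins]
      cases hp : p x
      · simp only [List.filter, hp]
        rw [pvInsertBy_all _ _ _ hall] at *
        simp [List.filter, hp] at *
      · simp only [List.filter, hp]
        rw [pvInsertBy_all _ _ _ hall]
        simp
    · have hins : PySem.List.insertBy (fun a b => decide (key a < key b)) x (y :: r)
          = y :: PySem.List.insertBy (fun a b => decide (key a < key b)) x r := by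
        simp [PySem.List.insertBy, hlt]
      rw [hins]
      have ihr := ih hpw.2
      cases hpy : p y <;> cases hpx : p x <;>
        simp_all [List.filter, PySem.List.insertBy]

-- filter commutes with the stable sort
theorem pvFilter_sorted {α κ : Type} [LinearOrder κ] (key : α → κ) (p : α → Bool) (l : List α) :
    (PySem.List.sorted l key false).filter p = PySem.List.sorted (l.filter p) key false := by
  rw [PySem.List.sorted_eq_foldl_insertBy, PySem.List.sorted_eq_foldl_insertBy]
  suffices H : ∀ acc : List α, acc.Pairwise (fun a b => key a ≤ key b) →
      (l.foldl (fun acc x => PySem.List.insertBy (fun a b => decide (key a < key b)) x acc) acc).filter p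
        = (l.filter p).foldl (fun acc x => PySem.List.insertBy (fun a b => decide (key a < key b)) x acc) (acc.filter p) by
    simpa using H [] (by simp)
  induction l with
  | nil => intro acc _; rfl
  | cons x t ih =>
    intro acc hacc
    simp only [List.foldl_cons, List.filter_cons]
    have hacc' : (PySem.List.insertBy (fun a b => decide (key a < key b)) x acc).Pairwise
        (fun a b => key a ≤ key b) := PySem.List.insertBy_pairwise_le key x acc hacc
    rw [ih _ hacc', pvFilter_insertBy key p x acc hacc]
    cases hp : p x
    · simp
    · simp

-- B's dedup loop as a structural recursion
def pvPick (seen : List (Int × Int)) : List (Int × (Int × Int) × (Int × Int)) → List (Int × Int)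
  | [] => []
  | t :: r =>
      if t.2.1 ∈ seen then pvPick seen r
      else t.2.2 :: pvPick (PySem.Set.add seen t.2.1) r

theorem pvFoldl_pick (l : List (Int × (Int × Int) × (Int × Int))) (seen : List (Int × Int)) (chosen : List (Int × Int)) :
    (l.foldl pvPickStep (seen, chosen)).2 = chosen ++ pvPick seen l := by
  induction l generalizing seen chosen with
  | nil => simp [pvPick]
  | cons t r ih =>
    simp only [List.foldl_cons, pvPickStep, pvPick]
    by_cases hc : t.2.1 ∈ seen
    · simp [PySem.Set.contains, hc, ih]
    · simp [PySem.Set.contains, hc, ih]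

-- the fresh directions of the dedup loop, in the order they are first seen
def pvNewKeys (seen : List (Int × Int)) : List (Int × (Int × Int) × (Int × Int)) → List (Int × Int)
  | [] => []
  | t :: r =>
      if t.2.1 ∈ seen then pvNewKeys seen r
      else t.2.1 :: pvNewKeys (PySem.Set.add seen t.2.1) r

theorem pvMem_newKeys (l : List (Int × (Int × Int) × (Int × Int))) (seen : List (Int × Int)) (k : Int × Int) :
    k ∈ pvNewKeys seen l ↔ (k ∈ l.map (fun t => t.2.1) ∧ k ∉ seen) := by
  induction l generalizing seen with
  | nil => simp [pvNewKeys]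
  | cons t r ih =>
    simp only [pvNewKeys, List.map_cons, List.mem_cons]
    by_cases hm : t.2.1 ∈ seen
    · rw [if_pos hm, ih]
      constructor
      · rintro ⟨h1, h2⟩; exact ⟨Or.inr h1, h2⟩
      · rintro ⟨h1 | h1, h2⟩
        · subst h1; exact absurd hm h2
        · exact ⟨h1, h2⟩
    · rw [if_neg hm]
      simp only [List.mem_cons, ih, PySem.Set.mem_add]
      constructor
      · rintro (h | ⟨h1, h2⟩)
        · subst h; exact ⟨Or.inl rfl, hm⟩
        · exact ⟨Or.inr h1, fun hs => h2 (Or.inl hs)⟩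
      · rintro ⟨h1 | h1, h2⟩
        · exact Or.inl h1
        · by_cases hk : k = t.2.1
          · exact Or.inl hk
          · exact Or.inr ⟨h1, fun hs => by rcases hs with hs | hs; exact h2 hs; exact hk hs⟩

theorem pvNodup_newKeys (l : List (Int × (Int × Int) × (Int × Int))) (seen : List (Int × Int)) :
    (pvNewKeys seen l).Nodup := by
  induction l generalizing seen with
  | nil => simp [pvNewKeys]
  | cons t r ih =>
    simp only [pvNewKeys]
    by_cases hm : t.2.1 ∈ seen
    · rw [if_pos hm]; exact ih seen
    · rw [if_neg hm]
      refine List.nodup_cons.mpr ⟨fun hmem => ?_, ih _⟩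
      have := (pvMem_newKeys r (PySem.Set.add seen t.2.1) t.2.1).mp hmem
      exact this.2 ((PySem.Set.mem_add seen t.2.1 t.2.1).mpr (Or.inr rfl))

-- the chosen coordinates are the first triple of each fresh direction
theorem pvPick_eq_map (l : List (Int × (Int × Int) × (Int × Int))) (seen : List (Int × Int)) :
    pvPick seen l = (pvNewKeys seen l).map (fun k =>
      (((l.filter (fun t => t.2.1 == k)).head?).getD (0, (0, 0), (0, 0))).2.2) := by
  induction l generalizing seen with
  | nil => simp [pvPick, pvNewKeys]
  | cons t r ih =>
    simp only [pvPick, pvNewKeys, List.filter_cons]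
    by_cases hm : t.2.1 ∈ seen
    · rw [if_pos hm, if_pos hm, ih]
      apply List.map_congr_left
      intro k hk
      have hkn := (pvMem_newKeys r seen k).mp hk
      have hkt : (t.2.1 == k) = false := by
        simp only [beq_eq_false_iff_ne, ne_eq]
        intro h; exact hkn.2 (h ▸ hm)
      rw [hkt]
      simp
    · rw [if_neg hm, if_neg hm]
      simp only [List.map_cons]
      congr 1
      · simp
      · rw [ih]
        apply List.map_congr_left
        intro k hk
        have hkn := (pvMem_newKeys r (PySem.Set.add seen t.2.1) k).mp hk
        have hkt : (t.2.1 == k) = false := by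
          simp only [beq_eq_false_iff_ne, ne_eq]
          intro h
          exact hkn.2 ((PySem.Set.mem_add seen t.2.1 k).mpr (Or.inr h.symm))
        rw [hkt]
        simp

-- the strict running minimum on relabelled triples (B's sorted head, after pvHead_foldl_insertBy)
def pvRunMin3 (o : Option (Int × (Int × Int) × (Int × Int))) (m : List (Int × (Int × Int) × (Int × Int))) :
    Option (Int × (Int × Int) × (Int × Int)) :=
  m.foldl (fun acc t =>
    match acc with
    | none => some t
    | some q => if t.1 < q.1 then some t else some q) o

theorem pvHead_sorted_eq_runMin3 (l : List (Int × (Int × Int) × (Int × Int))) :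
    (PySem.List.sorted l (fun t => t.1) false).head? = pvRunMin3 none l := by
  rw [PySem.List.sorted_eq_foldl_insertBy, pvHead_foldl_insertBy]
  have h0 : (([] : List (Int × (Int × Int) × (Int × Int))).head?) = none := rfl
  rw [h0]
  unfold pvRunMin3
  congr 1
  funext o t
  cases o <;> rfl

-- running min commutes with a key-preserving relabelling of the elements
theorem pvRunMin3_map (l : List (Int × (Int × Int))) (φ : Int × (Int × Int) → Int × (Int × Int) × (Int × Int))
    (hφ : ∀ p, (φ p).1 = p.1) :
    pvRunMin3 none (l.map φ) = (pvRunMin none l).map φ := by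
  suffices H : ∀ o : Option (Int × (Int × Int)),
      pvRunMin3 (o.map φ) (l.map φ) = (pvRunMin o l).map φ by
    exact H none
  induction l with
  | nil => intro o; rfl
  | cons p r ih =>
    intro o
    simp only [pvRunMin3, pvRunMin, List.map_cons, List.foldl_cons]
    have hstep : (match o.map φ with
        | none => some (φ p)
        | some q => if (φ p).1 < q.1 then some (φ p) else some q)
        = (match o with
          | none => some p
          | some q => if p.1 < q.1 then some p else some q).map φ := by
      cases o with
      | none => rfl
      | some q =>
        simp only [Option.map_some, hφ p, hφ q]
        by_cases h : p.1 < q.1 <;> simp [h]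
    rw [hstep]
    exact ih _

-- the two orders on coordinate pairs used by `.sort()`
def pvLe2 (a b : Int × Int) : Prop := a.1 < b.1 ∨ (a.1 = b.1 ∧ a.2 ≤ b.2)

theorem pvLe2_trans {a b c : Int × Int} (h1 : pvLe2 a b) (h2 : pvLe2 b c) : pvLe2 a c := by
  unfold pvLe2 at *
  rcases h1 with h1 | ⟨h1, h1'⟩ <;> rcases h2 with h2 | ⟨h2, h2'⟩
  · exact Or.inl (lt_trans h1 h2)
  · exact Or.inl (h2 ▸ h1)
  · exact Or.inl (h1 ▸ h2)
  · exact Or.inr ⟨h1.trans h2, le_trans h1' h2'⟩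

theorem pvLe2_antisymm {a b : Int × Int} (h1 : pvLe2 a b) (h2 : pvLe2 b a) : a = b := by
  unfold pvLe2 at *
  rcases h1 with h1 | ⟨h1, h1'⟩ <;> rcases h2 with h2 | ⟨h2, h2'⟩ <;>
    [skip; skip; skip; exact Prod.ext h1 (le_antisymm h1' h2')] <;> omega

-- the Bool comparator sorted2 builds from the two projections
theorem pvLt2_total {a b : Int × Int}
    (h : ¬ (decide (a.1 < b.1) || (!decide (b.1 < a.1) && decide (a.2 < b.2))) = true) : pvLe2 b a := by
  simp only [Bool.or_eq_true, Bool.and_eq_true, Bool.not_eq_true', decide_eq_true_eq,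
    decide_eq_false_iff_not, not_or, not_and] at h
  unfold pvLe2
  omega

theorem pvLt2_le {a b : Int × Int}
    (h : (decide (a.1 < b.1) || (!decide (b.1 < a.1) && decide (a.2 < b.2))) = true) : pvLe2 a b := by
  simp only [Bool.or_eq_true, Bool.and_eq_true, Bool.not_eq_true', decide_eq_true_eq,
    decide_eq_false_iff_not] at h
  unfold pvLe2
  omega

theorem pvInsertBy2_pairwise (x : Int × Int) (ys : List (Int × Int)) (h : ys.Pairwise pvLe2) :
    (PySem.List.insertBy
        (fun a b => decide (a.1 < b.1) || (!decide (b.1 < a.1) && decide (a.2 < b.2))) x ys).Pairwise pvLe2 := by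
  induction ys with
  | nil => simp [PySem.List.insertBy, pvLe2]
  | cons y r ih =>
    have hpw := List.pairwise_cons.mp h
    by_cases hlt : (decide (x.1 < y.1) || (!decide (y.1 < x.1) && decide (x.2 < y.2))) = true
    · simp only [PySem.List.insertBy, hlt, if_true]
      refine List.pairwise_cons.mpr ⟨?_, h⟩
      intro z hz
      rcases List.mem_cons.mp hz with hz | hz
      · subst hz; exact pvLt2_le hlt
      · exact pvLe2_trans (pvLt2_le hlt) (hpw.1 z hz)
    · simp only [PySem.List.insertBy, hlt]
      refine List.pairwise_cons.mpr ⟨?_, ih hpw.2⟩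
      intro z hz
      rcases (PySem.List.mem_insertBy _ _ _ _).mp hz with hz2 | hz2
      · subst hz2; exact pvLt2_total hlt
      · exact hpw.1 z hz2

theorem pvSorted2_pairwise (xs : List (Int × Int)) :
    (PySem.List.sorted2 xs Prod.fst Prod.snd false).Pairwise pvLe2 := by
  unfold PySem.List.sorted2
  simp only
  suffices H : ∀ acc : List (Int × Int), acc.Pairwise pvLe2 →
      (xs.foldl (fun acc x => PySem.List.insertBy
        (fun a b => decide (a.1 < b.1) || (!decide (b.1 < a.1) && decide (a.2 < b.2))) x acc) acc).Pairwise pvLe2 by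
    exact H [] (by simp)
  induction xs with
  | nil => intro acc hacc; exact hacc
  | cons x t ih =>
    intro acc hacc
    exact ih _ (pvInsertBy2_pairwise x acc hacc)

-- Python's `.sort()` on pairs depends only on the multiset of elements
theorem pvSorted2_eq_of_perm {xs ys : List (Int × Int)} (h : xs.Perm ys) :
    PySem.List.sorted2 xs Prod.fst Prod.snd false = PySem.List.sorted2 ys Prod.fst Prod.snd false := by
  have hperm : (PySem.List.sorted2 xs Prod.fst Prod.snd false).Perm
      (PySem.List.sorted2 ys Prod.fst Prod.snd false) :=
    ((PySem.List.sorted2_perm xs Prod.fst Prod.snd false).trans h).trans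
      (PySem.List.sorted2_perm ys Prod.fst Prod.snd false).symm
  exact hperm.eq_of_pairwise (fun a b _ _ h1 h2 => pvLe2_antisymm h1 h2)
    (pvSorted2_pairwise xs) (pvSorted2_pairwise ys)

-- the per-test-case lists handed to the final sorts are permutations of each other
theorem pvPerCase (x y : Int) (ss : List (Int × Int)) :
    ((ss.foldl (pvStepA x y) PySem.Dict.empty).values.map (fun v => v.2)).Perm
      (((PySem.List.sorted (ss.map (pvItem x y)) (fun t => t.1) false).foldl pvPickStep
          (PySem.Set.empty, [])).2) := by
  -- names
  set items := ss.map (pvItem x y) with hitems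
  set sl := PySem.List.sorted items (fun t => t.1) false with hsl
  -- B's chosen list as a map over its fresh keys
  rw [pvFoldl_pick sl PySem.Set.empty []]
  simp only [List.nil_append]
  rw [pvPick_eq_map]
  -- A's values as a map over its keys
  have hAkeys : (ss.foldl (pvStepA x y) PySem.Dict.empty).keys
      = PySem.Set.ofList (ss.map (pvDir x y)) := by
    rw [pvStepA_keys]
    exact PySem.Set.update_nil_left _
  have hAnd : (ss.foldl (pvStepA x y) PySem.Dict.empty).keys.Nodup := by
    rw [hAkeys]; exact PySem.Set.nodup_ofList _
  rw [PySem.Dict.values_eq_map_keys _ hAnd (0, (0, 0))]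
  rw [List.map_map]
  -- the two key lists are permutations of each other
  have hdirs : ∀ t ∈ items, t.2.1 = pvDir x y t.2.2 := by
    intro t ht
    rw [hitems] at ht
    rcases List.mem_map.mp ht with ⟨s, _, rfl⟩
    rfl
  have hKperm : (pvNewKeys PySem.Set.empty sl).Perm (ss.foldl (pvStepA x y) PySem.Dict.empty).keys := by
    rw [hAkeys]
    rw [List.perm_ext_iff_of_nodup (pvNodup_newKeys sl PySem.Set.empty) (PySem.Set.nodup_ofList _)]
    intro k
    rw [pvMem_newKeys, PySem.Set.mem_ofList]
    simp only [PySem.Set.empty, List.not_mem_nil, not_false_iff, and_true]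
    constructor
    · intro hk
      rcases List.mem_map.mp hk with ⟨t, ht, rfl⟩
      have ht' : t ∈ items := (PySem.List.mem_sorted items (fun t => t.1) false t).mp ht
      rcases List.mem_map.mp ht' with ⟨s, hs, rfl⟩
      exact List.mem_map.mpr ⟨s, hs, rfl⟩
    · intro hk
      rcases List.mem_map.mp hk with ⟨s, hs, rfl⟩
      refine List.mem_map.mpr ⟨pvItem x y s, ?_, rfl⟩
      exact (PySem.List.mem_sorted items (fun t => t.1) false _).mpr
        (List.mem_map.mpr ⟨s, hs, rfl⟩)
  -- per key, B's first-in-sorted-order element is A's running minimum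
  have hsel : ∀ k ∈ pvNewKeys PySem.Set.empty sl,
      (((sl.filter (fun t => t.2.1 == k)).head?).getD (0, (0, 0), (0, 0))).2.2
        = ((ss.foldl (pvStepA x y) PySem.Dict.empty).getD k (0, (0, 0))).2 := by
    intro k _
    have hfilt : sl.filter (fun t => t.2.1 == k)
        = PySem.List.sorted (items.filter (fun t => t.2.1 == k)) (fun t => t.1) false := by
      rw [hsl]; exact pvFilter_sorted (fun t => t.1) (fun t => t.2.1 == k) items
    rw [hfilt, pvHead_sorted_eq_runMin3]
    have hif : items.filter (fun t => t.2.1 == k)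
        = ((ss.filter (fun s => pvDir x y s == k)).map (fun s => (pvG x y s, s))).map
            (fun p => (p.1, pvDir x y p.2, p.2)) := by
      rw [hitems, List.filter_map, List.map_map]
      rfl
    rw [hif, pvRunMin3_map _ _ (fun p => rfl)]
    unfold PySem.Dict.getD
    rw [pvStepA_get]
    have hnone : (PySem.Dict.empty : PySem.Dict (Int × Int) (Int × (Int × Int))).get? k = none := rfl
    rw [hnone]
    cases pvRunMin none ((ss.filter (fun s => pvDir x y s == k)).map (fun s => (pvG x y s, s))) with
    | none => rfl
    | some p => rfl
  -- assemble: equal maps over permuted key lists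
  calc ((ss.foldl (pvStepA x y) PySem.Dict.empty).keys.map
          (fun k => ((ss.foldl (pvStepA x y) PySem.Dict.empty).getD k (0, (0, 0))).2)).Perm
        ((pvNewKeys PySem.Set.empty sl).map
          (fun k => ((ss.foldl (pvStepA x y) PySem.Dict.empty).getD k (0, (0, 0))).2)) :=
      (hKperm.map _).symm
    _ = (pvNewKeys PySem.Set.empty sl).map (fun k =>
          (((sl.filter (fun t => t.2.1 == k)).head?).getD (0, (0, 0), (0, 0))).2.2) := by
      apply List.map_congr_left
      intro k hk
      exact (hsel k hk).symm

-- ===== VERDICT (by name: the statement is the Claim_ definition above) =====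
theorem calculate_visible_sandwiches_spec : Claim_equal_calculate_visible_sandwiches := by
  intro tcs _ _
  unfold Spec_calculate_visible_sandwiches
  unfold calculate_visible_sandwiches calculate_visible_sandwiches_alt
  apply List.map_congr_left
  intro tc _
  simp only
  exact pvSorted2_eq_of_perm (pvPerCase tc.1 tc.2.1 tc.2.2)
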